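-- pv_equiv track=rewrite | github.com/kemunoz/html-to-markdown | script.py | get_prepend_diff
-- ===== SOURCE A (Python) =====
-- def get_prepend_diff(currpath, parentfolder):
--     tokens = currpath.split('\\')
--     parent = parentfolder.split('.')[0]
--     toconcat = False
--     path = []
--     for str in tokens:
--         if toconcat:
--             path.append(str)
--         if str == parent:
--             toconcat = True
--
--     return '\\'.join(path)
-- ===== SOURCE B (Python) =====
-- def get_prepend_diff(currpath, parentfolder):
--     tokens = currpath.split('\\')
--     parent = parentfolder.split('.')[0]
--     if parent in tokens:
--         return '\\'.join(tokens[tokens.index(parent) + 1:])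
--     return ''
-- ===== Notes on version B (the rewrite author's own statement) =====
-- stated objective: simpler
-- what changed: Replaces the flag-carrying accumulation loop by locating the first matching token with .index and joining the slice after it (empty string when the parent token is absent).
import Mathlib
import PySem

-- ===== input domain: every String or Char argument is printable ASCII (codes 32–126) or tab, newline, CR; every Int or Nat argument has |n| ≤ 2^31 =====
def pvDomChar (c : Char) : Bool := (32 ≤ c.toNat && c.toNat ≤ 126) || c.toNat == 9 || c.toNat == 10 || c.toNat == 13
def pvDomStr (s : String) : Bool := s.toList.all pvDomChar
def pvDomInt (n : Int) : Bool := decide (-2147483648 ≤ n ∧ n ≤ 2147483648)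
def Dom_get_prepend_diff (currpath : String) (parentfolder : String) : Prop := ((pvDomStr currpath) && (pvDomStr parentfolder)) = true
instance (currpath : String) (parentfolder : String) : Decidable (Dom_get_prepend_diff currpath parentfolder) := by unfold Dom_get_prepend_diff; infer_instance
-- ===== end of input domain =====

-- B replaces A's flag-carrying accumulation loop by 'index the first matching token, join the slice after it' (objective: simpler).

-- ===== PORT A =====
-- A's loop body: append current token if the flag is set, then set the flag if the token equals parent.
def pvStepA (parent : String) (st : Bool × List String) (s : String) : Bool × List String :=
  (if s == parent then true else st.1, if st.1 then st.2 ++ [s] else st.2)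

def get_prepend_diff (currpath : String) (parentfolder : String) : String :=
  let tokens := (PySem.Str.split? currpath "\\").getD []
  let parent := PySem.List.pyGetD ((PySem.Str.split? parentfolder ".").getD []) 0 ""
  let st := tokens.foldl (pvStepA parent) (false, [])
  PySem.Str.join "\\" st.2

-- ===== PORT B =====
def get_prepend_diff_alt (currpath : String) (parentfolder : String) : String :=
  let tokens := (PySem.Str.split? currpath "\\").getD []
  let parent := PySem.List.pyGetD ((PySem.Str.split? parentfolder ".").getD []) 0 ""
  if parent ∈ tokens then
    match PySem.List.index? tokens parent with
    | some i => PySem.Str.join "\\" (PySem.List.slice tokens (some ((i : Int) + 1)) none)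
    | none => ""
  else ""

-- ===== PRECONDITION & SPEC =====
def Spec_get_prepend_diff (currpath : String) (parentfolder : String) (out : String) : Prop := out = get_prepend_diff_alt currpath parentfolder
instance (currpath : String) (parentfolder : String) (out : String) : Decidable (Spec_get_prepend_diff currpath parentfolder out) := by unfold Spec_get_prepend_diff; infer_instance

-- ===== CLAIM (what is proved, stated in full; the proofs are below) =====
def Claim_equal_get_prepend_diff : Prop := ∀ (currpath : String) (parentfolder : String), Dom_get_prepend_diff currpath parentfolder → Spec_get_prepend_diff currpath parentfolder (get_prepend_diff currpath parentfolder)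

-- ===== LEMMAS AND PROOFS =====

-- once the flag is set, every remaining token is appended
theorem pvStepA_true (p : String) (l : List String) (acc : List String) :
    l.foldl (pvStepA p) (true, acc) = (true, acc ++ l) := by
  induction l generalizing acc with
  | nil => simp
  | cons x xs ih => simp [pvStepA, ih]

-- characterisation of A's loop from the initial state
theorem pvLoopA_char (p : String) (l : List String) :
    (l.foldl (pvStepA p) (false, [])).2 =
      match PySem.List.index? l p with
      | some i => l.drop (i + 1)
      | none => [] := by
  induction l with
  | nil => simp [PySem.List.index?]
  | cons x xs ih =>
    by_cases hx : x = p
    · subst hx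
      rw [PySem.List.index?_cons_self]
      simp [pvStepA, pvStepA_true]
    · rw [PySem.List.index?_cons_of_ne xs hx]
      have : List.foldl (pvStepA p) (pvStepA p (false, []) x) xs
           = List.foldl (pvStepA p) (false, []) xs := by
        simp [pvStepA, hx]
      simp only [List.foldl_cons, this, ih]
      cases h : PySem.List.index? xs p <;> simp

-- ===== VERDICT (by name: the statement is the Claim_ definition above) =====
theorem get_prepend_diff_spec : Claim_equal_get_prepend_diff := by
  intro currpath parentfolder _
  unfold Spec_get_prepend_diff get_prepend_diff get_prepend_diff_alt
  set tokens := (PySem.Str.split? currpath "\\").getD [] with htok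
  set parent := PySem.List.pyGetD ((PySem.Str.split? parentfolder ".").getD []) 0 "" with hpar
  by_cases hmem : parent ∈ tokens
  · have hsome := (PySem.List.index?_isSome_iff (xs := tokens) (v := parent)).2 hmem
    obtain ⟨i, hi⟩ := Option.isSome_iff_exists.mp hsome
    simp only [hmem, if_true, hi, pvLoopA_char]
    have : PySem.List.slice tokens (some ((i : Int) + 1)) none = tokens.drop (i + 1) := by
      have : ((i : Int) + 1) = ((i + 1 : Nat) : Int) := by push_cast; ring
      rw [this, PySem.List.slice_from_natCast]
    rw [this]
  · have hnone := (PySem.List.index?_eq_none_iff (xs := tokens) (v := parent)).2 hmem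
    simp only [hmem, if_false, pvLoopA_char, hnone]
    simp [PySem.Str.join]
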